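-- pv_equiv track=rewrite | github.com/nicolasAmat/Kong | kong/utils.py | matrix_from_str
-- ===== SOURCE A (Python) =====
-- CAESAR_BDD_MAPPER = {
--     '1': '1',
--     '0': '0',
--     '=': '0',
--     '<': '0',
--     '>': '0',
--     '.': '.',
--     '~': '.',
--     '[': '.',
--     ']': '.'
-- }
--
-- def matrix_from_str(matrix_str):
--     """ Return matrix from caesar.bdd output.
--         (with run-length encoding)
--     """
--     matrix_str = matrix_str.split('\n')
--
--     if matrix_str == '':
--         return [], False
--
--     matrix, complete_matrix = [], True
--
--     # Iterate over lines
--     for line in matrix_str: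
--
--         if not len(line):
--             break
--
--         new_line = []
--         past_value = -1
--         parse_multiplier = False
--         multiplier = ""
--
--         for value in line:
--
--             if value == '(':
--                 parse_multiplier = True
--             elif value == ')':
--                 new_line.extend([past_value for _ in range(int(multiplier) - 1)])
--                 parse_multiplier = False
--                 multiplier = ""
--             elif parse_multiplier:
--                 multiplier += value
--             else:
--                 value = CAESAR_BDD_MAPPER[value]
--                 if value == '.':
--                     complete_matrix = False
--                 new_line.append(value)
--                 past_value = value
--
--         matrix.append(new_line)
--
--     return matrix, complete_matrix
-- ===== SOURCE B (Python) =====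
-- CAESAR_BDD_MAPPER = {
--     '1': '1',
--     '0': '0',
--     '=': '0',
--     '<': '0',
--     '>': '0',
--     '.': '.',
--     '~': '.',
--     '[': '.',
--     ']': '.'
-- }
--
--
-- def _tokenize(line):
--     """Split a line into tokens: single value characters and whole
--     '(...)' multiplier groups (raises ValueError on an unclosed '(')."""
--     tokens = []
--     i = 0
--     while i < len(line):
--         if line[i] == '(':
--             j = line.index(')', i)
--             tokens.append(line[i:j + 1])
--             i = j + 1
--         else:
--             tokens.append(line[i])
--             i += 1
--     return tokens
--
--
-- def matrix_from_str(matrix_str):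
--     """ Return matrix from caesar.bdd output.
--         (with run-length encoding)
--     """
--     matrix, complete_matrix = [], True
--
--     for line in matrix_str.split('\n'):
--         if not line:
--             break
--         new_line = []
--         past_value = -1
--         for token in _tokenize(line):
--             if token.startswith('('):
--                 new_line.extend([past_value] * (int(token[1:-1]) - 1))
--             else:
--                 mapped = CAESAR_BDD_MAPPER[token]
--                 if mapped == '.':
--                     complete_matrix = False
--                 new_line.append(mapped)
--                 past_value = mapped
--         matrix.append(new_line)
--
--     return matrix, complete_matrix
-- ===== Notes on version B (the rewrite author's own statement) =====
-- stated objective: alternative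
-- what changed: B first tokenizes each line into single value characters and whole '(...)' multiplier groups, then folds over the tokens, replacing A's char-by-char parser-state machine (parse_multiplier flag and multiplier accumulator).
-- outside the precondition, e.g. on matrix_from_str('('): A returns ([[]], True), B raises ValueError; on matrix_from_str('1(2'): A returns ([['1']], True), B raises ValueError; on matrix_from_str('(2)1'): A returns ([[-1, '1']], True), B returns ([[-1, '1']], True)
import Mathlib
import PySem

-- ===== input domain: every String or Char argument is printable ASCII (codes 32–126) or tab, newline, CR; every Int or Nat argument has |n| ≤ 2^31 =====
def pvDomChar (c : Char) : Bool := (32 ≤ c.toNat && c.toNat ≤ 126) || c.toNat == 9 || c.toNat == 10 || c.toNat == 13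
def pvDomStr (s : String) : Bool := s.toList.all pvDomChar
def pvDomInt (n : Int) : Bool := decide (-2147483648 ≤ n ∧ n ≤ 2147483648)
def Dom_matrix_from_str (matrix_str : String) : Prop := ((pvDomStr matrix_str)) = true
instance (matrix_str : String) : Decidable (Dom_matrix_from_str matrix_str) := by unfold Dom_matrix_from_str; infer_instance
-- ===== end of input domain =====

-- B re-implements the RLE parser by tokenizing each line (value chars / whole '(…)' groups)
-- and then folding over the tokens, instead of A's char-by-char parser-state machine;
-- objective: simpler decomposition, same cost.

-- ===== PORT A =====
-- CAESAR_BDD_MAPPER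
def pvMapper : PySem.Dict Char String :=
  PySem.Dict.ofList [('1', "1"), ('0', "0"), ('=', "0"), ('<', "0"), ('>', "0"),
                     ('.', "."), ('~', "."), ('[', "."), (']', ".")]

-- one iteration of A's inner `for value in line` loop; state = (new_line, past_value,
-- parse_multiplier, multiplier, complete_matrix).  Python's past_value starts as the int -1;
-- Pre_ guarantees a multiplier group never fires before a value was seen, so the sentinel "?"
-- (likewise the .getD defaults, which Pre_ makes unreachable: KeyError / ValueError in Python)
-- is never observable inside Pre_.
def pvStepA (st : List String × String × Bool × List Char × Bool) (c : Char) :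
    List String × String × Bool × List Char × Bool :=
  let (nl, past, pm, mult, comp) := st
  if c = '(' then (nl, past, true, mult, comp)
  else if c = ')' then
    -- new_line.extend([past_value for _ in range(int(multiplier) - 1)])
    (nl ++ List.replicate (((PySem.Int.ofChars? mult).getD 0 - 1)).toNat past, past, false, [], comp)
  else if pm then (nl, past, pm, mult ++ [c], comp)
  else
    let v := (PySem.Dict.get? pvMapper c).getD "?"   -- CAESAR_BDD_MAPPER[value]
    (nl ++ [v], v, pm, mult, if v = "." then false else comp)

-- A's outer `for line in matrix_str` loop with its `break` on an empty line
def pvLoopA : List (List Char) → Bool → List (List String) × Bool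
  | [], comp => ([], comp)
  | l :: ls, comp =>
    if l.length = 0 then ([], comp)
    else
      let st := l.foldl pvStepA ([], "?", false, [], comp)
      let (rest, compF) := pvLoopA ls st.2.2.2.2
      (st.1 :: rest, compF)

-- A's `if matrix_str == ''` AFTER the split compares a list with a string: always False in
-- Python, a dead branch, so it is not ported.
def matrix_from_str (matrix_str : String) : List (List String) × Bool :=
  pvLoopA (PySem.Chars.splitOn matrix_str.toList ['\n']) true

-- ===== PORT B =====
-- _tokenize: single value characters and whole '(…)' groups.  Source B raises ValueError on an
-- unclosed '(' (line.index); that input is outside Pre_, the port returns no further tokens there.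
def pvTokenize : List Char → List (List Char)
  | [] => []
  | c :: rest =>
    if c = '(' then
      match h : rest.dropWhile (· ≠ ')') with
      | ')' :: tail => ('(' :: rest.takeWhile (· ≠ ')') ++ [')']) :: pvTokenize tail
      | _ => []
    else [c] :: pvTokenize rest
termination_by l => l.length
decreasing_by
  · have h1 : (rest.takeWhile (· ≠ ')')).length + (')' :: tail).length = rest.length := by
      rw [← h, ← List.length_append, List.takeWhile_append_dropWhile]
    simp at h1 ⊢; omega
  · simp

-- one iteration of Source B's `for token in _tokenize(line)` loop; state = (new_line, past_value,
-- complete_matrix); past_value starts as the unobservable sentinel "?" exactly as in port A.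
def pvStepB (st : List String × String × Bool) (t : List Char) :
    List String × String × Bool :=
  let (nl, past, comp) := st
  match t with
  | [] => st
  | c :: ts =>
    if c = '(' then   -- token.startswith('(')
      -- new_line.extend([past_value] * (int(token[1:-1]) - 1)) ; token[1:-1] = (drop 1).dropLast
      (nl ++ List.replicate (((PySem.Int.ofChars? ts.dropLast).getD 0 - 1)).toNat past, past, comp)
    else
      let v := (PySem.Dict.get? pvMapper c).getD "?"   -- CAESAR_BDD_MAPPER[token]
      (nl ++ [v], v, if v = "." then false else comp)

-- Source B's outer loop with its `break` on an empty line
def pvLoopB : List (List Char) → Bool → List (List String) × Bool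
  | [], comp => ([], comp)
  | l :: ls, comp =>
    if l.length = 0 then ([], comp)
    else
      let st := (pvTokenize l).foldl pvStepB ([], "?", comp)
      let (rest, compF) := pvLoopB ls st.2.2
      (st.1 :: rest, compF)

def matrix_from_str_alt (matrix_str : String) : List (List String) × Bool :=
  pvLoopB (PySem.Chars.splitOn matrix_str.toList ['\n']) true

-- ===== PRECONDITION & SPEC =====
def pvIsVal (c : Char) : Bool :=
  c = '1' || c = '0' || c = '=' || c = '<' || c = '>' || c = '.' || c = '~' || c = '[' || c = ']'

-- a '(…'-chunk of a line (a piece of splitOn '(' after the first): an int multiplier,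
-- its closing ')', then only value characters until the next group
def pvWfChunk (t : List Char) : Bool :=
  !(t.dropWhile (· ≠ ')')).isEmpty &&
    ((PySem.Int.ofChars? (t.takeWhile (· ≠ ')'))).isSome &&
      ((t.dropWhile (· ≠ ')')).drop 1).all pvIsVal)

-- a well-formed line: a nonempty run of value characters, then zero or more '(…)'-groups,
-- each followed by value characters only
def pvWfLine (l : List Char) : Bool :=
  !((l.splitOn '(').headD []).isEmpty && (((l.splitOn '(').headD []).all pvIsVal &&
    ((l.splitOn '(').tail).all pvWfChunk)

-- Pre_ excludes the inputs on which A raises (KeyError on a character outside the mapper,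
-- ValueError on a multiplier that is not an int) and, among inputs A returns on, three
-- accidents of A's state machine: an unclosed '(' (A silently drops the rest of the line,
-- B raises ValueError), a '(' inside a multiplier group (A splices the digit runs into one
-- number, B raises ValueError), and a multiplier group before any value of its line (A's
-- int sentinel -1 leaks into the returned matrix, which is then not a list of strings).
def Pre_matrix_from_str (matrix_str : String) : Prop :=
  (((PySem.Chars.splitOn matrix_str.toList ['\n']).takeWhile (fun l => !l.isEmpty)).all
    pvWfLine) = true
instance (matrix_str : String) : Decidable (Pre_matrix_from_str matrix_str) := by
  unfold Pre_matrix_from_str; infer_instance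

def pvWitness_matrix_from_str : String := "101.\n0(3)1(12)"

def Spec_matrix_from_str (matrix_str : String) (out : List (List String) × Bool) : Prop :=
  out = matrix_from_str_alt matrix_str
instance (matrix_str : String) (out : List (List String) × Bool) :
    Decidable (Spec_matrix_from_str matrix_str out) := by unfold Spec_matrix_from_str; infer_instance

-- ===== CLAIM (what is proved, stated in full; the proofs are below) =====
def Claim_equal_matrix_from_str : Prop :=
  ∀ (matrix_str : String), Dom_matrix_from_str matrix_str → Pre_matrix_from_str matrix_str →
    Spec_matrix_from_str matrix_str (matrix_from_str matrix_str)

-- ===== LEMMAS AND PROOFS =====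

-- a line after its leading value character: value characters and closed '(…)' groups whose
-- contents contain no '(' and parse as a Python int
def pvWfTail : List Char → Bool
  | [] => true
  | c :: rest =>
    if c = '(' then
      match h : rest.dropWhile (· ≠ ')') with
      | _ :: tail =>
        if (rest.takeWhile (· ≠ ')')).contains '(' then false
        else if (PySem.Int.ofChars? (rest.takeWhile (· ≠ ')'))).isSome then pvWfTail tail
        else false
      | [] => false
    else if pvIsVal c then pvWfTail rest else false
termination_by l => l.length
decreasing_by
  · have h1 : (rest.takeWhile (· ≠ ')')).length + (List.dropWhile (· ≠ ')') rest).length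
        = rest.length := by rw [← List.length_append, List.takeWhile_append_dropWhile]
    rw [h] at h1; simp at h1 ⊢; omega
  · simp


-- a value character is neither paren
theorem pvIsVal_ne {c : Char} (h : pvIsVal c = true) : c ≠ '(' ∧ c ≠ ')' := by
  simp [pvIsVal] at h
  rcases h with ((((((((h | h) | h) | h) | h) | h) | h) | h) | h) <;> subst h <;>
    exact ⟨by decide, by decide⟩

-- the head of a nonempty dropWhile fails the predicate
theorem pv_dropWhile_head {p : Char → Bool} {l t : List Char} {x : Char}
    (h : l.dropWhile p = x :: t) : p x = false := by
  have h2 : l.dropWhile p ≠ [] := by simp [h]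
  have := List.head_dropWhile_not (l := l) p h2
  simpa [h] using this

-- unfolding equations for the well-founded definitions
theorem pvWfTail_group {rest tail : List Char} (hdw : rest.dropWhile (· ≠ ')') = ')' :: tail) :
    pvWfTail ('(' :: rest)
      = (if (rest.takeWhile (· ≠ ')')).contains '(' then false
         else if (PySem.Int.ofChars? (rest.takeWhile (· ≠ ')'))).isSome then pvWfTail tail
         else false) := by
  rw [pvWfTail, if_pos rfl]
  simp only [ne_eq] at hdw ⊢
  split
  · rename_i head tail0 heq
    rw [hdw] at heq
    injection heq with h1 h2
    subst h2; rfl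
  · rename_i heq
    rw [hdw] at heq; cases heq

theorem pvWfTail_val {c : Char} (rest : List Char) (hc : c ≠ '(') :
    pvWfTail (c :: rest) = if pvIsVal c then pvWfTail rest else false := by
  rw [pvWfTail]; simp [hc]

theorem pvTokenize_group {rest tail : List Char} (hdw : rest.dropWhile (· ≠ ')') = ')' :: tail) :
    pvTokenize ('(' :: rest)
      = ('(' :: rest.takeWhile (· ≠ ')') ++ [')']) :: pvTokenize tail := by
  rw [pvTokenize, if_pos rfl]
  simp only [ne_eq] at hdw ⊢
  split
  · rename_i tail0 heq
    rw [hdw] at heq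
    injection heq with h1 h2
    subst h2; rfl
  · rename_i heq
    exact absurd hdw (heq tail)

theorem pvTokenize_val {c : Char} (rest : List Char) (hc : c ≠ '(') :
    pvTokenize (c :: rest) = [c] :: pvTokenize rest := by
  rw [pvTokenize]; simp [hc]

-- A's parse_multiplier mode just accumulates the multiplier characters
theorem pvStepA_mult (ds : List Char) (hds : ∀ c ∈ ds, c ≠ '(' ∧ c ≠ ')')
    (nl : List String) (past : String) (m : List Char) (comp : Bool) :
    ds.foldl pvStepA (nl, past, true, m, comp) = (nl, past, true, m ++ ds, comp) := by
  induction ds generalizing m with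
  | nil => simp
  | cons c ds ih =>
    have hc := hds c (by simp)
    have h1 : pvStepA (nl, past, true, m, comp) c = (nl, past, true, m ++ [c], comp) := by
      simp [pvStepA, hc.1, hc.2]
    simp only [List.foldl_cons, h1, ih (fun c hc => hds c (by simp [hc]))]
    simp

-- on a well-formed line tail, A's char-by-char machine agrees with B's token fold
theorem pvLine_eq (n : Nat) : ∀ (l : List Char), l.length ≤ n → pvWfTail l = true →
    ∀ (nl : List String) (past : String) (comp : Bool),
    l.foldl pvStepA (nl, past, false, [], comp)
      = (((pvTokenize l).foldl pvStepB (nl, past, comp)).1,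
         ((pvTokenize l).foldl pvStepB (nl, past, comp)).2.1, false, [],
         ((pvTokenize l).foldl pvStepB (nl, past, comp)).2.2) := by
  induction n with
  | zero =>
    intro l hl _ nl past comp
    have : l = [] := by cases l <;> simp_all
    subst this; simp [pvTokenize]
  | succ n ih =>
    intro l hl hw nl past comp
    match l with
    | [] => simp [pvTokenize]
    | c :: rest =>
      by_cases hc : c = '('
      · subst hc
        cases hdw : rest.dropWhile (· ≠ ')') with
        | nil => rw [pvWfTail, hdw] at hw; simp at hw
        | cons x tail =>
          have hx : x = ')' := by
            have := pv_dropWhile_head hdw; simpa using this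
          subst hx
          rw [pvWfTail_group hdw] at hw
          have hnp : '(' ∉ rest.takeWhile (· ≠ ')') := by
            intro hmem
            rw [if_pos (by rw [List.contains_eq_mem]; exact decide_eq_true hmem)] at hw
            exact Bool.false_ne_true hw
          have hc2 : ¬((rest.takeWhile (· ≠ ')')).contains '(' = true) := by
            intro hmemT
            rw [List.contains_eq_mem] at hmemT
            exact hnp (of_decide_eq_true hmemT)
          rw [if_neg hc2] at hw
          have hwt : pvWfTail tail = true := by
            by_cases hint : (PySem.Int.ofChars? (rest.takeWhile (· ≠ ')'))).isSome
            · rwa [if_pos hint] at hw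
            · rw [if_neg hint] at hw; exact absurd hw Bool.false_ne_true
          have hsplit : rest = rest.takeWhile (· ≠ ')') ++ ')' :: tail := by
            conv_lhs => rw [← List.takeWhile_append_dropWhile (p := (· ≠ ')')) (l := rest)]
            rw [hdw]
          have hlen : tail.length ≤ n := by
            have := congrArg List.length hsplit
            simp at this hl; omega
          have hmem : ∀ a ∈ rest.takeWhile (· ≠ ')'), a ≠ '(' ∧ a ≠ ')' := by
            intro a ha
            refine ⟨?_, by simpa using List.mem_takeWhile_imp ha⟩
            intro hEq; subst hEq
            exact hnp ha
          -- left side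
          have hstep1 : pvStepA (nl, past, false, [], comp) '(' = (nl, past, true, [], comp) := by
            simp [pvStepA]
          conv_lhs => rw [List.foldl_cons, hstep1, hsplit, List.foldl_append,
            pvStepA_mult _ hmem]
          have hstep2 : pvStepA (nl, past, true, [] ++ rest.takeWhile (· ≠ ')'), comp) ')'
              = (nl ++ List.replicate
                  (((PySem.Int.ofChars? (rest.takeWhile (· ≠ ')'))).getD 0 - 1)).toNat past,
                 past, false, [], comp) := by
            simp [pvStepA]
          rw [List.foldl_cons, hstep2]
          -- right side
          rw [pvTokenize_group hdw]
          simp only [List.foldl_cons]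
          have hstep3 : pvStepB (nl, past, comp) ('(' :: rest.takeWhile (· ≠ ')') ++ [')'])
              = (nl ++ List.replicate
                  (((PySem.Int.ofChars? (rest.takeWhile (· ≠ ')'))).getD 0 - 1)).toNat past,
                 past, comp) := by
            simp [pvStepB]
          rw [hstep3]
          exact ih tail hlen hwt _ _ _
      · rw [pvWfTail_val rest hc] at hw
        have hv : pvIsVal c = true := by
          by_contra hfalse
          rw [if_neg hfalse] at hw; exact absurd hw Bool.false_ne_true
        rw [if_pos hv] at hw
        have hwt := hw
        have hne := pvIsVal_ne hv
        have hstepA : pvStepA (nl, past, false, [], comp) c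
            = (nl ++ [(PySem.Dict.get? pvMapper c).getD "?"],
               (PySem.Dict.get? pvMapper c).getD "?", false, [],
               if (PySem.Dict.get? pvMapper c).getD "?" = "." then false else comp) := by
          simp [pvStepA, hne.1, hne.2]
        have hstepB : pvStepB (nl, past, comp) [c]
            = (nl ++ [(PySem.Dict.get? pvMapper c).getD "?"],
               (PySem.Dict.get? pvMapper c).getD "?",
               if (PySem.Dict.get? pvMapper c).getD "?" = "." then false else comp) := by
          simp [pvStepB, hc]
        rw [List.foldl_cons, hstepA, pvTokenize_val rest hc, List.foldl_cons, hstepB]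
        exact ih rest (by simp at hl; omega) hwt _ _ _

-- splitOn pieces do not contain the separator
theorem pv_no_sep : ∀ (l t : List Char), t ∈ l.splitOnP (· == '(') → '(' ∉ t := by
  intro l
  induction l with
  | nil => intro t ht; rw [List.splitOnP_nil] at ht; simp at ht; simp [ht]
  | cons c l ih =>
    intro t ht
    rw [List.splitOnP_cons] at ht
    by_cases hc : c = '('
    · rw [if_pos (by simp [hc])] at ht
      rcases List.mem_cons.mp ht with h | h
      · simp [h]
      · exact ih t h
    · rw [if_neg (by simp [hc])] at ht
      cases hsp : l.splitOnP (· == '(') with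
      | nil => exact absurd hsp (List.splitOnP_ne_nil _ l)
      | cons s ss =>
        rw [hsp] at ht
        simp only [List.modifyHead_cons] at ht
        rcases List.mem_cons.mp ht with h | h
        · subst h
          intro hmem
          rcases List.mem_cons.mp hmem with h | h
          · exact hc h.symm
          · exact ih s (by rw [hsp]; exact List.mem_cons_self) h
        · exact ih t (by rw [hsp]; exact List.mem_cons.mpr (Or.inr h))

-- '['(']'.intercalate' written as a flat map
theorem pv_intercalate_eq : ∀ (rest : List (List Char)) (s0 : List Char),
    [('(' : Char)].intercalate (s0 :: rest) = s0 ++ rest.flatMap (fun t => '(' :: t) := by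
  intro rest
  induction rest with
  | nil => intro s0; simp [List.intercalate]
  | cons t rest ih =>
    intro s0
    have h1 := ih t
    simp only [List.intercalate, List.intersperse] at h1 ⊢
    simp [h1, List.flatMap_cons]

-- prepending value characters preserves a well-formed tail
theorem pv_wfTail_valPrefix : ∀ (s m : List Char), s.all pvIsVal = true →
    pvWfTail m = true → pvWfTail (s ++ m) = true := by
  intro s
  induction s with
  | nil => intro m _ hm; simpa using hm
  | cons c s ih =>
    intro m hs hm
    simp only [List.all_cons, Bool.and_eq_true] at hs
    rw [List.cons_append, pvWfTail_val _ (pvIsVal_ne hs.1).1, if_pos hs.1]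
    exact ih m hs.2 hm

-- a flat map of well-formed '('-chunks is a well-formed tail
theorem pv_chunks_wfTail : ∀ (ts : List (List Char)),
    (∀ t ∈ ts, pvWfChunk t = true) → (∀ t ∈ ts, '(' ∉ t) →
    pvWfTail (ts.flatMap (fun t => '(' :: t)) = true := by
  intro ts
  induction ts with
  | nil => intro _ _; rw [List.flatMap_nil, pvWfTail]
  | cons t ts ih =>
    intro hwf hnp
    have hw := hwf t List.mem_cons_self
    simp only [pvWfChunk, Bool.and_eq_true, Bool.not_eq_true', List.isEmpty_eq_false_iff] at hw
    obtain ⟨hne, hint, hvals⟩ := hw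
    -- the chunk splits at its first ')'
    have hd : t.dropWhile (· ≠ ')') = ')' :: (t.dropWhile (· ≠ ')')).drop 1 := by
      cases hdw : t.dropWhile (· ≠ ')') with
      | nil => exact absurd hdw hne
      | cons x r =>
        have := pv_dropWhile_head hdw
        simp only [decide_not] at this
        simp at this
        rw [this]; rfl
    have hsplit : t = t.takeWhile (· ≠ ')') ++ ')' :: (t.dropWhile (· ≠ ')')).drop 1 := by
      conv_lhs => rw [← List.takeWhile_append_dropWhile (p := (· ≠ ')')) (l := t)]
      rw [← hd]
    have hcontent : ∀ c ∈ t.takeWhile (· ≠ ')'), ¬(c = ')') := by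
      intro c hcmem
      simpa using List.mem_takeWhile_imp hcmem
    -- compute takeWhile/dropWhile of the rebuilt tail
    have htw : ∀ (R : List Char), (t.takeWhile (· ≠ ')') ++ ')' :: R).takeWhile (· ≠ ')')
        = t.takeWhile (· ≠ ')') := by
      intro R
      rw [List.takeWhile_append]
      split
      · simp
      · rename_i hall
        exfalso; apply hall
        rw [List.takeWhile_takeWhile]; simp
    have hdt : (t.takeWhile (· ≠ ')')).dropWhile (· ≠ ')') = [] := by
      rw [List.dropWhile_eq_nil_iff]
      intro x hx; simpa using List.mem_takeWhile_imp hx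
    have hdwR : ∀ (R : List Char), (t.takeWhile (· ≠ ')') ++ ')' :: R).dropWhile (· ≠ ')')
        = ')' :: R := by
      intro R
      simp only [List.dropWhile_append, hdt, List.isEmpty_nil, if_true]
      rw [List.dropWhile_cons]; simp
    -- rebuild and step through the group
    rw [List.flatMap_cons, List.cons_append]
    conv_lhs => rw [hsplit]
    rw [List.append_assoc, List.cons_append]
    rw [pvWfTail_group (hdwR _)]
    have hc2 : ¬(List.contains (List.takeWhile (· ≠ ')') (t.takeWhile (· ≠ ')') ++
        ')' :: (List.drop 1 (t.dropWhile (· ≠ ')')) ++ List.flatMap (fun t => '(' :: t) ts)))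
          '(' = true) := by
      rw [htw, List.contains_eq_mem]
      intro hmem
      exact hnp t List.mem_cons_self ((List.takeWhile_sublist _).subset (of_decide_eq_true hmem))
    rw [if_neg hc2, htw, if_pos hint]
    exact pv_wfTail_valPrefix _ _ hvals
      (ih (fun u hu => hwf u (List.mem_cons.mpr (Or.inr hu)))
          (fun u hu => hnp u (List.mem_cons.mpr (Or.inr hu))))

-- a well-formed line is a well-formed tail
theorem pvWfTail_of_line {l : List Char} (h : pvWfLine l = true) : pvWfTail l = true := by
  cases hsp : l.splitOn '(' with
  | nil => exact absurd hsp (List.splitOnP_ne_nil _ l)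
  | cons s0 rest =>
    rw [pvWfLine, hsp] at h
    simp only [List.headD_cons, List.tail_cons, Bool.and_eq_true, Bool.not_eq_true',
      List.all_eq_true] at h
    obtain ⟨hne, hs0, hrest⟩ := h
    have hl : l = s0 ++ rest.flatMap (fun t => '(' :: t) := by
      have hi := List.intercalate_splitOn (xs := l) '('
      rw [hsp, pv_intercalate_eq] at hi
      exact hi.symm
    rw [hl]
    apply pv_wfTail_valPrefix _ _ (by simpa [List.all_eq_true] using hs0)
    apply pv_chunks_wfTail
    · intro t ht; exact hrest t ht
    · intro t ht
      exact pv_no_sep l t (by rw [show l.splitOnP (· == '(') = s0 :: rest from hsp]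
                              exact List.mem_cons.mpr (Or.inr ht))

-- outer loops agree when every line before the first empty one is well-formed
theorem pvLoop_eq : ∀ (ls : List (List Char)) (comp : Bool),
    ((ls.takeWhile (fun l => !l.isEmpty)).all pvWfLine) = true →
    pvLoopA ls comp = pvLoopB ls comp := by
  intro ls
  induction ls with
  | nil => intro comp _; rfl
  | cons l ls ih =>
    intro comp hall
    by_cases hl : l.length = 0
    · simp [pvLoopA, pvLoopB, hl]
    · have hne : l.isEmpty = false := by
        cases l <;> simp_all
      rw [List.takeWhile_cons] at hall
      simp only [hne, Bool.not_false, if_true, List.all_cons, Bool.and_eq_true] at hall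
      have hline := pvLine_eq l.length l le_rfl (pvWfTail_of_line hall.1) [] "?" comp
      simp only [pvLoopA, pvLoopB, if_neg hl, hline, ih _ hall.2]

-- ===== VERDICT (by name: the statement is the Claim_ definition above) =====
theorem matrix_from_str_spec : Claim_equal_matrix_from_str := by
  intro s _ hpre
  unfold Spec_matrix_from_str matrix_from_str matrix_from_str_alt
  exact pvLoop_eq _ true hpre
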